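-- pv_equiv track=rewrite | github.com/netskopeoss/beam | src/beam/detector/features.py | get_sequence_map
-- ===== SOURCE A (Python) =====
-- from collections import Counter
-- from typing import Dict, List, Optional, Union
--
-- def get_sequence_map(sequences: List[str]) -> Optional[Dict[str, int]]:
--     """
--     Generate a sequence map from a list of sequences.
--
--     Args:
--         sequences (List[str]): A list of sequences.
--
--     Returns:
--         Optional[Dict[str, int]]: A dictionary mapping sequences to their counts, or None if sequences is empty.
--     """
--     if not sequences:
--         return None
--
--     raw_result = dict(Counter(sequences))
--     cut_off = 5
--     result = dict()
--
--     for k in raw_result: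
--         if int(raw_result[k]) >= cut_off:
--             result[k] = raw_result[k]
--
--     return result
-- ===== SOURCE B (Python) =====
-- def get_sequence_map(sequences):
--     """Same result as A: None on empty input, else {seq: count} for counts >= 5.
--
--     No Counter/hash counting: repeatedly partition the remaining list around
--     its first element, which yields that element's multiplicity directly and
--     removes all its copies; keys are met in first-occurrence order, as in A.
--     """
--     if not sequences:
--         return None
--     result = {}
--     remaining = sequences
--     while remaining:
--         s = remaining[0]
--         same = 0
--         rest = []
--         for x in remaining:
--             if x == s:
--                 same += 1
--             else:
--                 rest.append(x)
--         if same >= 5: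
--             result[s] = same
--         remaining = rest
--     return result
-- ===== Notes on version B (the rewrite author's own statement) =====
-- stated objective: alternative
-- what changed: Replaces Counter-then-filter (hash counting plus a second filtering pass) with repeated partitioning of the remaining list around its first element, obtaining each distinct sequence's multiplicity from the partition and shrinking the list, with no hash map or counting dictionary at all.
import Mathlib
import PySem

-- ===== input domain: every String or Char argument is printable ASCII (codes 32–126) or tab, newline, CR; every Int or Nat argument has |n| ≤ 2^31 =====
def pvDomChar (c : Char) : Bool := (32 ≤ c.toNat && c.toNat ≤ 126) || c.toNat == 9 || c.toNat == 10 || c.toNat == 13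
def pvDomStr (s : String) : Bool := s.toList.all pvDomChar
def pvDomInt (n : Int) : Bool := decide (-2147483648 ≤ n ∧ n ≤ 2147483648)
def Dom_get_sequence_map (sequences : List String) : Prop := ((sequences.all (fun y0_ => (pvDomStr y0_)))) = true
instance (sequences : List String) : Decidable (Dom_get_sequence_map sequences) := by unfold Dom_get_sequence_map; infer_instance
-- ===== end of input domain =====

-- B replaces A's Counter-then-filter with repeated partitioning of the remaining
-- list around its first element (no counting dictionary); objective: alternative.

-- ===== PORT A =====
-- raw_result[k] is ported as getD k 0: k ranges over raw's own keys, so the lookup never misses.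
def get_sequence_map (sequences : List String) : Option (List (String × Int)) :=
  if sequences = [] then none
  else
    let raw : PySem.Dict String Int := PySem.Dict.counter sequences
    let result :=
      raw.keys.foldl
        (fun r k => if 5 ≤ raw.getD k 0 then r.insert k (raw.getD k 0) else r)
        PySem.Dict.empty
    some result.items

-- ===== PORT B =====
-- B's inner for loop over `remaining` (count matches, collect the rest), as a foldl.
def altPartStep (s : String) (st : Int × List String) (x : String) : Int × List String :=
  if x == s then (st.1 + 1, st.2) else (st.1, st.2 ++ [x])

-- Partitioning shrinks the list (cited by altLoop's decreasing_by).
theorem altPart_snd (s : String) :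
    ∀ (l : List String) (c : Int) (r : List String),
      l.foldl (altPartStep s) (c, r) = (c + (l.count s : Int), r ++ l.filter (fun x => !(x == s))) := by
  intro l
  induction l with
  | nil => intro c r; simp
  | cons x t ih =>
    intro c r
    by_cases hx : x = s
    · simp [altPartStep, hx, ih]
      ring_nf
    · simp [altPartStep, hx, ih]

-- B's while loop: partition `remaining` around its head, record the head's
-- multiplicity when ≥ 5, continue on the rest.
def altLoop (remaining : List String) (result : List (String × Int)) : List (String × Int) :=
  match remaining with
  | [] => result
  | s :: t =>
    let p := (s :: t).foldl (altPartStep s) ((0 : Int), ([] : List String))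
    altLoop p.2 (if 5 ≤ p.1 then result ++ [(s, p.1)] else result)
termination_by remaining.length
decreasing_by
  simp only [altPart_snd, List.filter_cons, BEq.rfl, Bool.not_true, List.nil_append]
  calc (List.filter (fun x => !(x == s)) t).length ≤ t.length := List.length_filter_le _ _
    _ < (s :: t).length := by simp

def get_sequence_map_alt (sequences : List String) : Option (List (String × Int)) :=
  if sequences = [] then none else some (altLoop sequences [])

-- ===== PRECONDITION & SPEC =====
def Spec_get_sequence_map (sequences : List String) (out : Option (List (String × Int))) : Prop := out = get_sequence_map_alt sequences
instance (sequences : List String) (out : Option (List (String × Int))) : Decidable (Spec_get_sequence_map sequences out) := by unfold Spec_get_sequence_map; infer_instance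

-- ===== CLAIM (what is proved, stated in full; the proofs are below) =====
def Claim_equal_get_sequence_map : Prop := ∀ (sequences : List String), Dom_get_sequence_map sequences → Spec_get_sequence_map sequences (get_sequence_map sequences)

-- ===== LEMMAS AND PROOFS =====

-- Both sides reduce to this canonical form: kept (key, count) pairs over the
-- first-occurrence dedup of the input.
def keptPairs (seqs : List String) : List (String × Int) :=
  (PySem.List.dedup seqs).filterMap
    (fun k => if 5 ≤ (seqs.count k : Int) then some (k, (seqs.count k : Int)) else none)

-- Set.add preserves membership.
theorem contains_add {α : Type} [BEq α] (acc : PySem.Set α) (x y : α)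
    (h : acc.contains y = true) : (PySem.Set.add acc x).contains y = true := by
  unfold PySem.Set.add
  split <;> simp_all [PySem.Set.contains]

-- Elements already present are skipped by the dedup fold.
theorem foldl_add_filter {α : Type} [BEq α] [LawfulBEq α] (s : α) :
    ∀ (t : List α) (acc : PySem.Set α), acc.contains s = true →
      t.foldl PySem.Set.add acc = (t.filter (fun x => !(x == s))).foldl PySem.Set.add acc := by
  intro t
  induction t with
  | nil => intros; rfl
  | cons x t ih =>
    intro acc h
    by_cases hx : x = s
    · subst hx
      have : PySem.Set.add acc x = acc := by
        unfold PySem.Set.add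
        simp [PySem.Set.contains] at h ⊢
        simp [h]
      simp [this, ih acc h]
    · simp only [List.filter_cons]
      have hxs : (x == s) = false := by simp [hx]
      simp only [hxs, Bool.not_false, if_pos, List.foldl_cons]
      exact ih _ (contains_add acc x s h)

-- A fold starting from s :: acc, over elements all ≠ s, keeps s in front.
theorem foldl_add_cons {α : Type} [BEq α] [LawfulBEq α] (s : α) :
    ∀ (l : List α) (acc : List α), (∀ x ∈ l, (x == s) = false) →
      l.foldl PySem.Set.add (s :: acc) = s :: l.foldl PySem.Set.add acc := by
  intro l
  induction l with
  | nil => intros; rfl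
  | cons x t ih =>
    intro acc hall
    have hx : (x == s) = false := hall x (by simp)
    have hstep : PySem.Set.add (s :: acc) x = s :: PySem.Set.add acc x := by
      simp only [PySem.Set.add, PySem.Set.contains, List.contains_cons, hx, Bool.false_or]
      by_cases hac : x ∈ acc <;> simp [hac]
    simp only [List.foldl_cons, hstep]
    exact ih _ (fun y hy => hall y (by simp [hy]))

-- First-occurrence dedup of a cons: head, then dedup of the tail with copies removed.
theorem dedup_cons (s : String) (t : List String) :
    PySem.List.dedup (s :: t) = s :: PySem.List.dedup (t.filter (fun x => !(x == s))) := by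
  unfold PySem.List.dedup PySem.Set.ofList
  simp only [List.foldl_cons]
  have h1 : PySem.Set.add PySem.Set.empty s = [s] := rfl
  rw [h1, foldl_add_filter s t [s] (by simp [PySem.Set.contains])]
  exact foldl_add_cons s _ [] (fun x hx => by simpa using (List.mem_filter.mp hx).2)

-- B's loop computes the canonical form.
theorem altLoop_eq : ∀ (n : Nat) (seqs : List String), seqs.length ≤ n →
    ∀ (acc : List (String × Int)), altLoop seqs acc = acc ++ keptPairs seqs := by
  intro n
  induction n with
  | zero =>
    intro seqs h acc
    have : seqs = [] := List.eq_nil_of_length_eq_zero (Nat.le_zero.mp h)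
    subst this
    rw [altLoop.eq_def]
    simp [keptPairs]
  | succ n ih =>
    intro seqs h acc
    match seqs with
    | [] =>
      rw [altLoop.eq_def]
      simp [keptPairs]
    | s :: t =>
      rw [altLoop.eq_def]
      simp only [altPart_snd, List.filter_cons, BEq.rfl, Bool.not_true, List.nil_append, zero_add]
      rw [if_neg (by decide : ¬ (false = true))]
      set rest := t.filter (fun x => !(x == s)) with hrest
      have hlen : rest.length ≤ n := by
        rw [hrest]
        have := List.length_filter_le (fun x => !(x == s)) t
        simp at h
        omega
      rw [ih rest hlen]
      -- counts over rest agree with counts over s :: t for keys of dedup rest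
      have hcnt : keptPairs rest
          = (PySem.List.dedup rest).filterMap
              (fun k => if 5 ≤ (((s :: t).count k : Nat) : Int) then some (k, (((s :: t).count k : Nat) : Int)) else none) := by
        apply List.filterMap_congr
        intro k hk
        have hk' : k ∈ rest := (PySem.List.mem_dedup _ _).mp hk
        have hks : ¬ k = s := by
          have := (List.mem_filter.mp hk').2
          simp at this
          exact this
        have h1 : rest.count k = t.count k := by
          rw [hrest]
          exact List.count_filter (by simp [hks])
        have h2 : (s :: t).count k = t.count k := by
          have : (s == k) = false := by
            cases he : s == k
            · rfl
            · exact absurd ((beq_iff_eq).mp he).symm hks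
          simp [List.count_cons, this]
        rw [h1, h2]
      have hrhs : keptPairs (s :: t)
          = (if (5:Int) ≤ (((s :: t).count s : Nat) : Int)
              then [(s, (((s :: t).count s : Nat) : Int))] else []) ++ keptPairs rest := by
        rw [hcnt]
        unfold keptPairs
        rw [dedup_cons, ← hrest, List.filterMap_cons]
        by_cases h5 : (5:Int) ≤ (t.count s : Int) + 1
        · simp [List.count_cons, h5]
        · simp [List.count_cons, h5]
      rw [hrhs]
      by_cases h5 : (5:Int) ≤ (t.count s : Int) + 1
      · simp [h5]
      · simp [h5]

-- A's filter-insert loop over fresh distinct keys appends exactly the kept pairs.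
theorem items_foldl_insert_if {κ ν : Type} [BEq κ] [LawfulBEq κ]
    (ks : List κ) (p : κ → Prop) [DecidablePred p] (v : κ → ν) (d : PySem.Dict κ ν)
    (hnd : ks.Nodup) (hfresh : ∀ k ∈ ks, d.contains k = false) :
    (ks.foldl (fun r k => if p k then r.insert k (v k) else r) d).items
      = d.items ++ ks.filterMap (fun k => if p k then some (k, v k) else none) := by
  induction ks generalizing d with
  | nil => simp
  | cons k rest ih =>
    have hk : d.contains k = false := hfresh k (by simp)
    have hrest : ∀ k' ∈ rest, k' ≠ k := by
      intro k' hk' he; exact (List.nodup_cons.mp hnd).1 (he ▸ hk')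
    simp only [List.foldl_cons, List.filterMap_cons]
    by_cases hp : p k
    · rw [if_pos hp, if_pos hp,
        ih (d.insert k (v k)) (List.nodup_cons.mp hnd).2
          (by
            intro k' hk'
            rw [PySem.Dict.contains_insert]
            simp [hrest k' hk', hfresh k' (by simp [hk'])]),
        PySem.Dict.items_insert, hk]
      simp
    · rw [if_neg hp, if_neg hp,
        ih d (List.nodup_cons.mp hnd).2 (fun k' hk' => hfresh k' (by simp [hk']))]

-- ===== VERDICT (by name: the statement is the Claim_ definition above) =====
theorem get_sequence_map_spec : Claim_equal_get_sequence_map := by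
  intro sequences _
  unfold Spec_get_sequence_map get_sequence_map get_sequence_map_alt
  by_cases h : sequences = []
  · simp [h]
  · simp only [if_neg h]
    rw [altLoop_eq sequences.length sequences le_rfl []]
    rw [PySem.Dict.keys_counter, ← PySem.List.dedup_eq_ofList,
      items_foldl_insert_if _ _ _ _ (PySem.List.nodup_dedup sequences)
        (fun k _ => PySem.Dict.contains_empty k)]
    simp [PySem.Dict.getD_counter, PySem.Dict.empty, keptPairs]
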